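-- pv_equiv track=rewrite | github.com/CeliaFernandez/CONDOR-Launcher | toCONDOR.py | identifyCMSSW
-- ===== SOURCE A (Python) =====
-- def identifyCMSSW(command):
--
--     """ Function to identify release of a given path """
--     cmsswpart = False
--     for part in command.split():
--         if 'CMSSW' in part:
--             cmsswpart = part
--
--     cmsswpath = ''
--     for level in cmsswpart.split('/'):
--         cmsswpath += level + '/'
--         if 'CMSSW' in level:
--             cmsswpath += 'src'
--             break
--
--     return cmsswpath
-- ===== SOURCE B (Python) =====
-- def identifyCMSSW(command):
--     """ Function to identify release of a given path """
--     matches = [part for part in command.split() if 'CMSSW' in part]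
--     cmsswpart = matches[-1]
--     i = cmsswpart.find('CMSSW')
--     slash = cmsswpart.find('/', i)
--     if slash == -1:
--         return cmsswpart + '/src'
--     return cmsswpart[:slash] + '/src'
-- ===== Notes on version B (the rewrite author's own statement) =====
-- stated objective: simpler
-- what changed: Phase 1 becomes a comprehension taking the last matching token; phase 2's split('/')-and-accumulate loop is replaced by direct index arithmetic: find the first 'CMSSW', find the next '/', and slice, so no level list is built or traversed.
import Mathlib
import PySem

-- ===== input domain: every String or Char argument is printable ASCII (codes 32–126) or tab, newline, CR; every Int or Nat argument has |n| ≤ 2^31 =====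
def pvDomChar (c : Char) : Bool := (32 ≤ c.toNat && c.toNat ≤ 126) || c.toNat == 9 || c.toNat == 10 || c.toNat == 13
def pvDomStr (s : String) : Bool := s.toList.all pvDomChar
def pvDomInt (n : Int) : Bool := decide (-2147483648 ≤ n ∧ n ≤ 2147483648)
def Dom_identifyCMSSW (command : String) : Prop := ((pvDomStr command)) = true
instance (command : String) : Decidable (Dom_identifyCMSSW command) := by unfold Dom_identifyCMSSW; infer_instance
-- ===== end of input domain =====

-- B replaces A's split('/')-and-accumulate second loop by direct index work (find 'CMSSW',
-- find the next '/', slice); same return value wherever A returns (objective: simpler).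

-- ===== PORT A =====
def pvCMSSW : List Char := ['C', 'M', 'S', 'S', 'W']

-- the 'for level in cmsswpart.split('/')' loop with its break, accumulating cmsswpath
def pvALoop : List (List Char) → List Char → List Char
  | [], acc => acc
  | l :: rest, acc =>
    let acc' := acc ++ l ++ ['/']
    if PySem.Chars.isIn pvCMSSW l then acc' ++ ['s', 'r', 'c'] else pvALoop rest acc'

def identifyCMSSW (command : String) : String :=
  let cmsswpart : Option (List Char) :=
    (PySem.Chars.split₀ command.toList).foldl
      (fun acc part => if PySem.Chars.isIn pvCMSSW part then some part else acc) none
  match cmsswpart with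
  | none => ""   -- Python: cmsswpart = False, .split('/') raises AttributeError; outside Pre_
  | some t => String.ofList (pvALoop (PySem.Chars.splitOn t ['/']) [])

-- ===== PORT B =====
def identifyCMSSW_alt (command : String) : String :=
  let ms := (PySem.Chars.split₀ command.toList).filter (fun p => PySem.Chars.isIn pvCMSSW p)
  match PySem.List.pyGet? ms (-1) with
  | none => ""   -- Python: matches[-1] raises IndexError; outside Pre_
  | some t =>
    let i := PySem.Chars.find t pvCMSSW
    let slash := PySem.Chars.findFrom t ['/'] i none
    if slash = -1 then String.ofList (t ++ ['/', 's', 'r', 'c'])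
    else String.ofList (PySem.Chars.slice t none (some slash) ++ ['/', 's', 'r', 'c'])

-- ===== PRECONDITION & SPEC =====
-- Pre_ excludes exactly the commands with no whitespace token containing 'CMSSW':
-- there A raises AttributeError (cmsswpart is False); B raises IndexError there too.
def Pre_identifyCMSSW (command : String) : Prop :=
  (PySem.Chars.split₀ command.toList).any (fun p => PySem.Chars.isIn pvCMSSW p) = true
instance (command : String) : Decidable (Pre_identifyCMSSW command) := by
  unfold Pre_identifyCMSSW; infer_instance

def pvWitness_identifyCMSSW : String := "cd /a/CMSSW_1_2/x/y out.txt"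

def Spec_identifyCMSSW (command : String) (out : String) : Prop := out = identifyCMSSW_alt command
instance (command : String) (out : String) : Decidable (Spec_identifyCMSSW command out) := by
  unfold Spec_identifyCMSSW; infer_instance

-- ===== CLAIM (what is proved, stated in full; the proofs are below) =====
def Claim_equal_identifyCMSSW : Prop := ∀ (command : String), Dom_identifyCMSSW command → Pre_identifyCMSSW command → Spec_identifyCMSSW command (identifyCMSSW command)

-- ===== LEMMAS AND PROOFS =====

-- reference shape of PySem.Chars.splitOn · ['/'] (fuel removed)
def pvRef : List Char → List Char → List (List Char)
  | [], cur => [cur.reverse]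
  | c :: rest, cur => if c = '/' then cur.reverse :: pvRef rest [] else pvRef rest (c :: cur)

theorem pvSplitOn_go_eq_ref (fuel : Nat) : ∀ (l cur : List Char) (acc : List (List Char)),
    l.length ≤ fuel →
    PySem.Chars.splitOn.go ['/'] fuel l cur acc = acc.reverse ++ pvRef l cur := by
  induction fuel with
  | zero =>
    intro l cur acc h
    have : l = [] := List.eq_nil_of_length_eq_zero (Nat.le_zero.mp h)
    subst this
    simp [PySem.Chars.splitOn.go, pvRef]
  | succ fuel ih =>
    intro l cur acc h
    match l with
    | [] => simp [PySem.Chars.splitOn.go, pvRef]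
    | c :: rest =>
      rw [PySem.Chars.splitOn.go]
      by_cases hc : c = '/'
      · subst hc
        have hpre : List.isPrefixOf ['/'] ('/' :: rest) = true := by
          simp [List.isPrefixOf]
        simp only [hpre, if_true, List.length_cons, List.drop_succ_cons, List.length_nil, List.drop_zero]
        rw [ih rest [] (cur.reverse :: acc) (by simpa using Nat.le_of_succ_le_succ h)]
        simp [pvRef]
      · have hpre : List.isPrefixOf ['/'] (c :: rest) = false := by
          simp [List.isPrefixOf]; exact fun h => absurd h.symm hc
        simp only [hpre, Bool.false_eq_true, if_false]
        rw [ih rest (c :: cur) acc (by simpa using Nat.le_of_succ_le_succ h)]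
        simp [pvRef, hc]

theorem pvSplitOn_eq_ref (t : List Char) :
    PySem.Chars.splitOn t ['/'] = pvRef t [] := by
  have := pvSplitOn_go_eq_ref (t.length + 1) t [] [] (by omega)
  simpa [PySem.Chars.splitOn] using this

theorem pvRef_no_slash (l : List Char) (hl : '/' ∉ l) : ∀ cur, pvRef l cur = [cur.reverse ++ l] := by
  induction l with
  | nil => intro cur; simp [pvRef]
  | cons c rest ih =>
    intro cur
    have hc : c ≠ '/' := fun h => hl (h ▸ List.mem_cons_self ..)
    have hrest : '/' ∉ rest := fun h => hl (List.mem_cons_of_mem _ h)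
    simp [pvRef, hc, ih hrest]

theorem pvRef_append (l t' : List Char) (hl : '/' ∉ l) : ∀ cur,
    pvRef (l ++ '/' :: t') cur = (cur.reverse ++ l) :: pvRef t' [] := by
  induction l with
  | nil => intro cur; simp [pvRef]
  | cons c rest ih =>
    intro cur
    have hc : c ≠ '/' := fun h => hl (h ▸ List.mem_cons_self ..)
    have hrest : '/' ∉ rest := fun h => hl (List.mem_cons_of_mem _ h)
    simp [pvRef, hc, ih hrest]

theorem pvALoop_acc (L : List (List Char)) : ∀ acc, pvALoop L acc = acc ++ pvALoop L [] := by
  induction L with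
  | nil => intro acc; simp [pvALoop]
  | cons l rest ih =>
    intro acc
    simp only [pvALoop]
    by_cases hl : PySem.Chars.isIn pvCMSSW l = true
    · simp [hl]
    · simp only [Bool.not_eq_true] at hl
      simp only [hl, Bool.false_eq_true, if_false]
      rw [ih (acc ++ l ++ ['/']), ih ([] ++ l ++ ['/'])]
      simp

theorem pvLastMatch (pred : List Char → Bool) (parts : List (List Char)) :
    ∀ acc : Option (List Char),
    parts.foldl (fun a p => if pred p then some p else a) acc = ((parts.filter pred).getLast?).or acc := by
  induction parts with
  | nil => intro acc; simp
  | cons p rest ih =>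
    intro acc
    by_cases hp : pred p = true
    · simp only [List.foldl_cons, hp, if_true, List.filter_cons, ih]
      have : (p :: List.filter pred rest).getLast? = (List.filter pred rest).getLast?.or (some p) := by
        cases h : List.filter pred rest with
        | nil => simp
        | cons a b => rw [List.getLast?_cons_cons]; cases hb : (a :: b).getLast? with
          | none => simp at hb
          | some v => simp
      simp [this]
    · simp only [Bool.not_eq_true] at hp
      simp [List.foldl_cons, hp, ih]

theorem pvPyGet_neg_one {α : Type} (xs : List α) : PySem.List.pyGet? xs (-1) = xs.getLast? := by
  match xs with
  | [] => rfl
  | x :: rest =>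
    simp only [PySem.List.pyGet?, PySem.List.pyIdx?]
    norm_num
    rw [List.getLast?_eq_getElem?]
    simp

theorem pvSingleton_prefix (c : Char) (z : List Char) : [c] <+: z ↔ z.head? = some c := by
  cases z with
  | nil => simp
  | cons h t => simp [List.cons_prefix_cons]; exact eq_comm

-- an occurrence cannot cross a separator the pattern does not contain
theorem pvPrefix_append_cons (sub x y : List Char) (c : Char) (hc : c ∉ sub) :
    sub <+: x ++ c :: y ↔ sub <+: x := by
  constructor
  · intro h
    by_cases hle : sub.length ≤ x.length
    · have := List.prefix_iff_eq_take.mp h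
      rw [List.take_append_of_le_length hle] at this
      exact this ▸ List.take_prefix _ _
    · exfalso
      obtain ⟨r, hr⟩ := h
      have hx : x.length < sub.length := Nat.lt_of_not_le hle
      have hget : sub[x.length]? = some c := by
        have h1 : (sub ++ r)[x.length]? = sub[x.length]? := List.getElem?_append_left hx
        have h2 : (x ++ c :: y)[x.length]? = some c := by
          rw [List.getElem?_append_right (Nat.le_refl _)]
          simp
        rw [hr] at h1
        rw [← h1, h2]
      exact hc (List.mem_of_getElem? hget)
  · exact List.prefix_append_of_prefix

theorem pvIsIn_append_cons (sub x y : List Char) (c : Char) (hc : c ∉ sub) :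
    PySem.Chars.isIn sub (x ++ c :: y) = (PySem.Chars.isIn sub x || PySem.Chars.isIn sub y) := by
  rw [Bool.eq_iff_iff, Bool.or_eq_true]
  rw [← PySem.Chars.exists_prefix_drop_iff_isIn, ← PySem.Chars.exists_prefix_drop_iff_isIn,
      ← PySem.Chars.exists_prefix_drop_iff_isIn]
  constructor
  · rintro ⟨j, hj⟩
    by_cases hle : j ≤ x.length
    · rw [List.drop_append_of_le_length hle, pvPrefix_append_cons _ _ _ _ hc] at hj
      exact Or.inl ⟨j, hj⟩
    · have hx : x ++ c :: y = (x ++ [c]) ++ y := by simp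
      have hj' : j = (x ++ [c]).length + (j - x.length - 1) := by
        simp only [List.length_append, List.length_cons, List.length_nil]
        omega
      rw [hx, hj', List.drop_length_add_append] at hj
      exact Or.inr ⟨_, hj⟩
  · rintro (⟨j, hj⟩ | ⟨j, hj⟩)
    · by_cases hle : j ≤ x.length
      · exact ⟨j, by rw [List.drop_append_of_le_length hle]; exact List.prefix_append_of_prefix hj⟩
      · have : x.drop j = [] := List.drop_eq_nil_of_le (by omega)
        rw [this, List.prefix_nil] at hj
        exact ⟨0, by simp [hj]⟩
    · refine ⟨(x ++ [c]).length + j, ?_⟩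
      have hx : x ++ c :: y = (x ++ [c]) ++ y := by simp
      rw [hx, List.drop_length_add_append]
      exact hj

theorem pvFind_eq_of (sub t : List Char) (n : Nat) (h1 : sub <+: t.drop n)
    (h2 : ∀ i < n, ¬ sub <+: t.drop i) : PySem.Chars.find t sub = n := by
  have hinf : sub <:+: t := (List.IsPrefix.isInfix h1).trans (List.drop_suffix n t).isInfix
  have h0 : 0 ≤ PySem.Chars.find t sub := (PySem.Chars.find_nonneg_iff t sub).mpr hinf
  obtain ⟨hsp, hmin⟩ := PySem.Chars.find_spec h0
  rcases lt_trichotomy (PySem.Chars.find t sub).toNat n with hlt | heq | hgt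
  · exact absurd hsp (h2 _ hlt)
  · rw [← heq, Int.toNat_of_nonneg h0]
  · exact absurd h1 (hmin n hgt)

theorem pvFind_in_left (sub x y : List Char) (c : Char) (hc : c ∉ sub)
    (hsub : sub <:+: x) : PySem.Chars.find (x ++ c :: y) sub = PySem.Chars.find x sub := by
  have h0 : 0 ≤ PySem.Chars.find x sub := (PySem.Chars.find_nonneg_iff x sub).mpr hsub
  obtain ⟨hsp, hmin⟩ := PySem.Chars.find_spec h0
  have hlen : (PySem.Chars.find x sub).toNat ≤ x.length := by
    have := PySem.Chars.find_le_length x sub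
    omega
  have := pvFind_eq_of sub (x ++ c :: y) (PySem.Chars.find x sub).toNat
    (by rw [List.drop_append_of_le_length hlen]; exact List.prefix_append_of_prefix hsp)
    (fun i hi => by
      rw [List.drop_append_of_le_length (by omega), pvPrefix_append_cons _ _ _ _ hc]
      exact hmin i hi)
  rw [this, Int.toNat_of_nonneg h0]

theorem pvFind_in_right (sub x y : List Char) (c : Char) (hc : c ∉ sub)
    (hx : ¬ sub <:+: x) (hy : sub <:+: y) :
    PySem.Chars.find (x ++ c :: y) sub = x.length + 1 + PySem.Chars.find y sub := by
  have h0 : 0 ≤ PySem.Chars.find y sub := (PySem.Chars.find_nonneg_iff y sub).mpr hy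
  obtain ⟨hsp, hmin⟩ := PySem.Chars.find_spec h0
  have hxc : x ++ c :: y = (x ++ [c]) ++ y := by simp
  have hnx : ∀ j, ¬ sub <+: x.drop j := by
    intro j hj
    exact hx ((List.IsPrefix.isInfix hj).trans (List.drop_suffix j x).isInfix)
  have := pvFind_eq_of sub (x ++ c :: y) (x.length + 1 + (PySem.Chars.find y sub).toNat)
    (by
      have : x.length + 1 + (PySem.Chars.find y sub).toNat = (x ++ [c]).length + (PySem.Chars.find y sub).toNat := by
        simp
      rw [this, hxc, List.drop_length_add_append]
      exact hsp)
    (fun i hi => by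
      by_cases hle : i ≤ x.length
      · rw [List.drop_append_of_le_length hle, pvPrefix_append_cons _ _ _ _ hc]
        exact hnx i
      · have heq : i = (x ++ [c]).length + (i - x.length - 1) := by simp; omega
        rw [heq, hxc, List.drop_length_add_append]
        exact hmin _ (by simp at heq ⊢; omega))
  rw [this]
  push_cast
  rw [Int.toNat_of_nonneg h0]

theorem pvFind_slash (x y : List Char) (c : Char) (hx : c ∉ x) :
    PySem.Chars.find (x ++ c :: y) [c] = x.length := by
  have := pvFind_eq_of [c] (x ++ c :: y) x.length
    (by rw [List.drop_append_of_le_length (Nat.le_refl _)]; simp)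
    (fun i hi => by
      rw [List.drop_append_of_le_length (by omega), pvSingleton_prefix]
      intro hhead
      rw [List.head?_append] at hhead
      have hne : x.drop i ≠ [] := by
        intro hnil
        have := congrArg List.length hnil
        simp at this
        omega
      have hmem : c ∈ x.drop i := by
        rw [List.head?_eq_some_head hne] at hhead
        have := List.head_mem hne
        rwa [Option.some_inj.mp hhead] at this
      exact hx (List.mem_of_mem_drop hmem))
  rw [this]

theorem pvFind_singleton_no_mem (z : List Char) (c : Char) (hc : c ∉ z) :
    PySem.Chars.find z [c] = -1 := by
  rw [PySem.Chars.find_eq_neg_one_iff]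
  intro hinf
  obtain ⟨s, t', hst⟩ := hinf
  exact hc (by rw [← hst]; simp)

theorem pvSplit_first_slash (t : List Char) (hmem : '/' ∈ t) :
    ∃ l t', t = l ++ '/' :: t' ∧ '/' ∉ l := by
  have hrestne : t.dropWhile (fun c => c != '/') ≠ [] := by
    intro h
    rw [List.dropWhile_eq_nil_iff] at h
    simpa using h '/' hmem
  obtain ⟨c0, t', hrest⟩ := List.exists_cons_of_ne_nil hrestne
  have hc0 : c0 = '/' := by
    have hh := List.head?_dropWhile_not (fun c => c != '/') t
    rw [hrest] at hh
    simpa using hh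
  refine ⟨t.takeWhile (fun c => c != '/'), t', ?_, ?_⟩
  · have h := (List.takeWhile_append_dropWhile (p := fun c => c != '/') (l := t)).symm
    rw [hrest, hc0] at h
    exact h
  · intro h
    simpa using List.mem_takeWhile_imp h

-- the second phase of A equals the second phase of B, on any token containing 'CMSSW'
theorem pvMain : ∀ (n : Nat) (t : List Char), t.length ≤ n →
    PySem.Chars.isIn pvCMSSW t = true →
    pvALoop (PySem.Chars.splitOn t ['/']) [] =
      (if PySem.Chars.findFrom t ['/'] (PySem.Chars.find t pvCMSSW) none = -1
       then t ++ ['/', 's', 'r', 'c']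
       else PySem.Chars.slice t none
              (some (PySem.Chars.findFrom t ['/'] (PySem.Chars.find t pvCMSSW) none)) ++ ['/', 's', 'r', 'c']) := by
  intro n
  induction n with
  | zero =>
    intro t hlen ht
    have : t = [] := List.eq_nil_of_length_eq_zero (Nat.le_zero.mp hlen)
    subst this
    exact absurd ht (by decide)
  | succ n ih =>
    intro t hlen ht
    rw [pvSplitOn_eq_ref]
    have hKc : '/' ∉ pvCMSSW := by decide
    by_cases hmem : '/' ∈ t
    · obtain ⟨l, t', hteq, hlnot⟩ := pvSplit_first_slash t hmem
      subst hteq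
      rw [pvRef_append l t' hlnot []]
      simp only [List.reverse_nil, List.nil_append]
      have hsplit := pvIsIn_append_cons pvCMSSW l t' '/' hKc
      rw [ht] at hsplit
      by_cases hl : PySem.Chars.isIn pvCMSSW l = true
      · -- CMSSW occurs in the first level l: both sides return l ++ "/src"
        have hsubl : pvCMSSW <:+: l := (PySem.Chars.isIn_iff_infix pvCMSSW l).mp hl
        have hfi := pvFind_in_left pvCMSSW l t' '/' hKc hsubl
        have h0 : 0 ≤ PySem.Chars.find l pvCMSSW :=
          (PySem.Chars.find_nonneg_iff l pvCMSSW).mpr hsubl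
        have hkl : (PySem.Chars.find l pvCMSSW).toNat ≤ l.length := by
          have := PySem.Chars.find_le_length l pvCMSSW
          omega
        have hcast : PySem.Chars.find l pvCMSSW = ((PySem.Chars.find l pvCMSSW).toNat : Int) :=
          (Int.toNat_of_nonneg h0).symm
        have hk : (PySem.Chars.find l pvCMSSW).toNat ≤ (l ++ '/' :: t').length := by
          simp; omega
        rw [hfi, hcast, PySem.Chars.findFrom_natCast _ ['/'] _ hk]
        have hdrop : (l ++ '/' :: t').drop (PySem.Chars.find l pvCMSSW).toNat
            = l.drop (PySem.Chars.find l pvCMSSW).toNat ++ '/' :: t' :=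
          List.drop_append_of_le_length hkl
        have hnotmem : '/' ∉ l.drop (PySem.Chars.find l pvCMSSW).toNat :=
          fun h => hlnot (List.mem_of_mem_drop h)
        have hfs : PySem.Chars.find ((l ++ '/' :: t').drop (PySem.Chars.find l pvCMSSW).toNat) ['/']
            = ((l.drop (PySem.Chars.find l pvCMSSW).toNat).length : Int) := by
          rw [hdrop]
          exact pvFind_slash _ t' '/' hnotmem
        rw [hfs]
        have hne : (((l.drop (PySem.Chars.find l pvCMSSW).toNat).length : Int)) ≠ -1 := by
          omega
        rw [if_neg hne]
        have hsum : ((PySem.Chars.find l pvCMSSW).toNat : Int)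
            + ((l.drop (PySem.Chars.find l pvCMSSW).toNat).length : Int) = (l.length : Int) := by
          rw [List.length_drop]
          omega
        rw [if_neg (by rw [hsum]; omega), hsum]
        have hslice : PySem.Chars.slice (l ++ '/' :: t') none (some (l.length : Int)) = l := by
          rw [PySem.Chars.slice_eq_listSlice, PySem.List.slice_to_natCast]
          exact List.take_left
        rw [hslice]
        simp [pvALoop, hl]
      · -- CMSSW occurs only past the first slash: peel l ++ "/" and recurse
        have hlf : PySem.Chars.isIn pvCMSSW l = false := by
          simpa using hl
        rw [hlf] at hsplit
        have ht' : PySem.Chars.isIn pvCMSSW t' = true := by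
          simpa using hsplit.symm
        have hnx : ¬ pvCMSSW <:+: l := (PySem.Chars.isIn_eq_false_iff pvCMSSW l).mp hlf
        have hy : pvCMSSW <:+: t' := (PySem.Chars.isIn_iff_infix pvCMSSW t').mp ht'
        have hfi := pvFind_in_right pvCMSSW l t' '/' hKc hnx hy
        have h0' : 0 ≤ PySem.Chars.find t' pvCMSSW :=
          (PySem.Chars.find_nonneg_iff t' pvCMSSW).mpr hy
        have hk' : (PySem.Chars.find t' pvCMSSW).toNat ≤ t'.length := by
          have := PySem.Chars.find_le_length t' pvCMSSW
          omega
        have hcast' : PySem.Chars.find t' pvCMSSW = ((PySem.Chars.find t' pvCMSSW).toNat : Int) :=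
          (Int.toNat_of_nonneg h0').symm
        have hk : l.length + 1 + (PySem.Chars.find t' pvCMSSW).toNat ≤ (l ++ '/' :: t').length := by
          simp; omega
        have hcast : (l.length : Int) + 1 + PySem.Chars.find t' pvCMSSW
            = ((l.length + 1 + (PySem.Chars.find t' pvCMSSW).toNat : Nat) : Int) := by
          push_cast
          omega
        rw [hfi, hcast, PySem.Chars.findFrom_natCast _ ['/'] _ hk]
        have hdropt : (l ++ '/' :: t').drop (l.length + 1 + (PySem.Chars.find t' pvCMSSW).toNat)
            = t'.drop (PySem.Chars.find t' pvCMSSW).toNat := by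
          have h1 : l ++ '/' :: t' = (l ++ ['/']) ++ t' := by simp
          have h2 : l.length + 1 + (PySem.Chars.find t' pvCMSSW).toNat
              = (l ++ ['/']).length + (PySem.Chars.find t' pvCMSSW).toNat := by simp
          rw [h1, h2, List.drop_length_add_append]
        rw [hdropt]
        have iht' := ih t' (by simp at hlen; omega) ht'
        rw [hcast', PySem.Chars.findFrom_natCast t' ['/'] _ hk'] at iht'
        rw [pvSplitOn_eq_ref] at iht'
        have hloop : pvALoop (l :: pvRef t' []) [] = (l ++ ['/']) ++ pvALoop (pvRef t' []) [] := by
          simp only [pvALoop, hlf, Bool.false_eq_true, if_false]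
          rw [pvALoop_acc]
          simp
        rw [hloop, iht']
        by_cases hf : PySem.Chars.find (t'.drop (PySem.Chars.find t' pvCMSSW).toNat) ['/'] = -1
        · have houterR : (if PySem.Chars.find (t'.drop (PySem.Chars.find t' pvCMSSW).toNat) ['/'] = -1
              then (-1 : Int)
              else ((l.length + 1 + (PySem.Chars.find t' pvCMSSW).toNat : Nat) : Int)
                + PySem.Chars.find (t'.drop (PySem.Chars.find t' pvCMSSW).toNat) ['/']) = -1 := by
            rw [if_pos hf]
          have houterL : (if PySem.Chars.find (t'.drop (PySem.Chars.find t' pvCMSSW).toNat) ['/'] = -1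
              then (-1 : Int)
              else (((PySem.Chars.find t' pvCMSSW).toNat : Nat) : Int)
                + PySem.Chars.find (t'.drop (PySem.Chars.find t' pvCMSSW).toNat) ['/']) = -1 := by
            rw [if_pos hf]
          rw [if_pos houterR, if_pos houterL]
          simp
        · have hfge : 0 ≤ PySem.Chars.find (t'.drop (PySem.Chars.find t' pvCMSSW).toNat) ['/'] := by
            have := PySem.Chars.neg_one_le_find (t'.drop (PySem.Chars.find t' pvCMSSW).toNat) ['/']
            omega
          rw [if_neg hf, if_neg hf]
          have hne2 : ((l.length + 1 + (PySem.Chars.find t' pvCMSSW).toNat : Nat) : Int)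
              + PySem.Chars.find (t'.drop (PySem.Chars.find t' pvCMSSW).toNat) ['/'] ≠ -1 := by
            omega
          have hne3 : (((PySem.Chars.find t' pvCMSSW).toNat : Nat) : Int)
              + PySem.Chars.find (t'.drop (PySem.Chars.find t' pvCMSSW).toNat) ['/'] ≠ -1 := by
            omega
          rw [if_neg hne2, if_neg hne3]
          have hslice1 : PySem.Chars.slice (l ++ '/' :: t') none
              (some (((l.length + 1 + (PySem.Chars.find t' pvCMSSW).toNat : Nat) : Int)
                + PySem.Chars.find (t'.drop (PySem.Chars.find t' pvCMSSW).toNat) ['/']))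
              = (l ++ ['/']) ++ t'.take ((PySem.Chars.find t' pvCMSSW).toNat
                + (PySem.Chars.find (t'.drop (PySem.Chars.find t' pvCMSSW).toNat) ['/']).toNat) := by
            rw [PySem.Chars.slice_eq_listSlice, PySem.List.slice_to _ (by omega)]
            have h1 : l ++ '/' :: t' = (l ++ ['/']) ++ t' := by simp
            have h2 : (((l.length + 1 + (PySem.Chars.find t' pvCMSSW).toNat : Nat) : Int)
                + PySem.Chars.find (t'.drop (PySem.Chars.find t' pvCMSSW).toNat) ['/']).toNat
                = (l ++ ['/']).length + ((PySem.Chars.find t' pvCMSSW).toNat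
                  + (PySem.Chars.find (t'.drop (PySem.Chars.find t' pvCMSSW).toNat) ['/']).toNat) := by
              simp
              omega
            rw [h1, h2, List.take_length_add_append]
          have hslice2 : PySem.Chars.slice t' none
              (some (((PySem.Chars.find t' pvCMSSW).toNat : Int)
                + PySem.Chars.find (t'.drop (PySem.Chars.find t' pvCMSSW).toNat) ['/']))
              = t'.take ((PySem.Chars.find t' pvCMSSW).toNat
                + (PySem.Chars.find (t'.drop (PySem.Chars.find t' pvCMSSW).toNat) ['/']).toNat) := by
            rw [PySem.Chars.slice_eq_listSlice, PySem.List.slice_to _ (by omega)]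
            congr 1
            omega
          rw [hslice1, hslice2]
          simp
    · -- no slash in the token: both sides return t ++ "/src"
      rw [pvRef_no_slash t hmem []]
      have h0 : 0 ≤ PySem.Chars.find t pvCMSSW :=
        (PySem.Chars.find_nonneg_iff t pvCMSSW).mpr ((PySem.Chars.isIn_iff_infix pvCMSSW t).mp ht)
      have hk : (PySem.Chars.find t pvCMSSW).toNat ≤ t.length := by
        have := PySem.Chars.find_le_length t pvCMSSW
        omega
      have hcast : PySem.Chars.find t pvCMSSW = ((PySem.Chars.find t pvCMSSW).toNat : Int) :=
        (Int.toNat_of_nonneg h0).symm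
      rw [hcast, PySem.Chars.findFrom_natCast t ['/'] _ hk]
      have hnos : PySem.Chars.find (t.drop (PySem.Chars.find t pvCMSSW).toNat) ['/'] = -1 :=
        pvFind_singleton_no_mem _ _ (fun h => hmem (List.mem_of_mem_drop h))
      rw [hnos]
      simp [pvALoop, ht]

-- ===== VERDICT (by name: the statement is the Claim_ definition above) =====
theorem identifyCMSSW_spec : Claim_equal_identifyCMSSW := by
  intro command hdom hpre
  unfold Spec_identifyCMSSW identifyCMSSW identifyCMSSW_alt
  rw [pvLastMatch]
  dsimp only
  rw [pvPyGet_neg_one, Option.or_none]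
  have hne : (PySem.Chars.split₀ command.toList).filter (fun p => PySem.Chars.isIn pvCMSSW p) ≠ [] := by
    unfold Pre_identifyCMSSW at hpre
    rw [List.any_eq_true] at hpre
    obtain ⟨p, hp, hpp⟩ := hpre
    intro hnil
    have := List.filter_eq_nil_iff.mp hnil p hp
    simp [hpp] at this
  have hsome : ∃ t, ((PySem.Chars.split₀ command.toList).filter (fun p => PySem.Chars.isIn pvCMSSW p)).getLast? = some t := by
    cases h : ((PySem.Chars.split₀ command.toList).filter (fun p => PySem.Chars.isIn pvCMSSW p)).getLast? with
    | none => exact absurd (List.getLast?_eq_none_iff.mp h) hne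
    | some t => exact ⟨t, rfl⟩
  obtain ⟨t, ht⟩ := hsome
  rw [ht]
  have htmem : t ∈ (PySem.Chars.split₀ command.toList).filter (fun p => PySem.Chars.isIn pvCMSSW p) :=
    List.mem_of_getLast? ht
  have htin : PySem.Chars.isIn pvCMSSW t = true := (List.mem_filter.mp htmem).2
  dsimp only
  rw [pvMain t.length t le_rfl htin]
  split_ifs <;> rfl
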